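-- pv_equiv track=rewrite | github.com/Dollyn-boy/PBL1-TabuleiroNumerico | tabuleiro_numerico.py | verificar_horizontal
-- ===== SOURCE A (Python) =====
-- def verificar_horizontal(matriz_tabuleiro, tamanho_tabuleiro):
--     for linha in range(tamanho_tabuleiro):
--         valor_referencia = matriz_tabuleiro[linha][0]
--         for coluna in range(1, tamanho_tabuleiro):
--             if matriz_tabuleiro[linha][coluna] != valor_referencia - coluna:
--                 break
--         else:
--             return True
--     return False
-- ===== SOURCE B (Python) =====
-- def verificar_horizontal(matriz_tabuleiro, tamanho_tabuleiro):
--     if tamanho_tabuleiro <= 0: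
--         return False
--
--     def alguma(linhas):
--         if not linhas:
--             return False
--         fila = linhas[0][:tamanho_tabuleiro]
--         inicio = fila[0]
--         if fila == list(range(inicio, inicio - tamanho_tabuleiro, -1)):
--             return True
--         return alguma(linhas[1:])
--
--     return alguma(matriz_tabuleiro[:tamanho_tabuleiro])
-- ===== Notes on version B (the rewrite author's own statement) =====
-- stated objective: alternative
-- what changed: B recurses over the row list instead of index loops, and decides each row by constructing the expected descending run with range(inicio, inicio - tamanho, -1) and comparing it to the row slice by list equality, instead of A's per-cell comparison against the anchor value minus the column index.
-- outside the precondition, e.g. on verificar_horizontal([[2, 1], [5]], 2): A returns True, B returns True; on verificar_horizontal([[9, 3], [1, 2]], 3): A raises IndexError, B returns False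
import Mathlib
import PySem

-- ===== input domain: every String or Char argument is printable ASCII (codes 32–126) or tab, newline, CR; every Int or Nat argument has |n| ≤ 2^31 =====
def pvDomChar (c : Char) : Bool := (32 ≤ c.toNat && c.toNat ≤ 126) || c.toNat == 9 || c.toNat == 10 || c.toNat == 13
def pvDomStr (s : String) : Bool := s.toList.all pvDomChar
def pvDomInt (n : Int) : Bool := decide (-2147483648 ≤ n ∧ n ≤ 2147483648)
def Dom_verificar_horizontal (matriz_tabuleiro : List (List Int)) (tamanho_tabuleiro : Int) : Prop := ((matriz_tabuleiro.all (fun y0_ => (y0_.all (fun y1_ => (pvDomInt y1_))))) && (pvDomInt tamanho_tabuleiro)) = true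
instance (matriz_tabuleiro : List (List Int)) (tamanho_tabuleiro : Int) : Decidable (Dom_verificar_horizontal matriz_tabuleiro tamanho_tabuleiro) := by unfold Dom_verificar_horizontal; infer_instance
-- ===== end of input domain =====

-- B recurses over the row list and decides each row by building the expected descending
-- run with range(inicio, inicio - tamanho, -1) and comparing lists, instead of A's
-- index loops with anchor-minus-column comparisons (alternative decomposition, same cost).

-- ===== PORT A =====
-- for linha in range(t): ref = m[linha][0]; for coluna in range(1, t): if m[linha][coluna] != ref - coluna: break / else: return True; return False
def verificar_horizontal (matriz_tabuleiro : List (List Int)) (tamanho_tabuleiro : Int) : Bool :=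
  (PySem.List.pyRange 0 tamanho_tabuleiro 1).any (fun linha =>
    let fila := PySem.List.pyGetD matriz_tabuleiro linha []
    let valor_referencia := PySem.List.pyGetD fila 0 0
    (PySem.List.pyRange 1 tamanho_tabuleiro 1).all (fun coluna =>
      PySem.List.pyGetD fila coluna 0 == valor_referencia - coluna))

-- ===== PORT B =====
-- def alguma(linhas): if not linhas: return False
--   fila = linhas[0][:t]; inicio = fila[0]
--   if fila == list(range(inicio, inicio - t, -1)): return True
--   return alguma(linhas[1:])
-- (fila[0] is ported as pyGetD fila 0 0: inside Pre_ the slice is nonempty, so this is exact there)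
def vhAux (t : Int) : List (List Int) → Bool
  | [] => false
  | linha :: resto =>
    let fila := PySem.List.slice linha none (some t)
    let inicio := PySem.List.pyGetD fila 0 0
    if fila == PySem.List.pyRange inicio (inicio - t) (-1) then true else vhAux t resto

-- if t <= 0: return False; return alguma(m[:t])
def verificar_horizontal_alt (matriz_tabuleiro : List (List Int)) (tamanho_tabuleiro : Int) : Bool :=
  if tamanho_tabuleiro ≤ 0 then false
  else vhAux tamanho_tabuleiro (PySem.List.slice matriz_tabuleiro none (some tamanho_tabuleiro))

-- ===== PRECONDITION & SPEC =====
-- Pre_ restricts to well-formed boards (when tamanho ≥ 1: at least tamanho rows, each of the first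
-- tamanho rows of length ≥ tamanho); on malformed boards A raises IndexError or, if an early row
-- happens to match before a short row is reached, returns True — an accident of board shape no
-- caller relies on (cited in claim.json).
def Pre_verificar_horizontal (matriz_tabuleiro : List (List Int)) (tamanho_tabuleiro : Int) : Prop :=
  tamanho_tabuleiro ≤ 0 ∨
    (tamanho_tabuleiro ≤ matriz_tabuleiro.length ∧
      ∀ r ∈ matriz_tabuleiro.take tamanho_tabuleiro.toNat, tamanho_tabuleiro ≤ r.length)
instance (matriz_tabuleiro : List (List Int)) (tamanho_tabuleiro : Int) : Decidable (Pre_verificar_horizontal matriz_tabuleiro tamanho_tabuleiro) := by unfold Pre_verificar_horizontal; infer_instance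
def pvWitness_verificar_horizontal : List (List Int) × Int := ([[3, 2, 1], [5, 1, 2], [9, 8, 7]], 3)

def Spec_verificar_horizontal (matriz_tabuleiro : List (List Int)) (tamanho_tabuleiro : Int) (out : Bool) : Prop := out = verificar_horizontal_alt matriz_tabuleiro tamanho_tabuleiro
instance (matriz_tabuleiro : List (List Int)) (tamanho_tabuleiro : Int) (out : Bool) : Decidable (Spec_verificar_horizontal matriz_tabuleiro tamanho_tabuleiro out) := by unfold Spec_verificar_horizontal; infer_instance

-- ===== CLAIM (what is proved, stated in full; the proofs are below) =====
def Claim_equal_verificar_horizontal : Prop := ∀ (matriz_tabuleiro : List (List Int)) (tamanho_tabuleiro : Int), Dom_verificar_horizontal matriz_tabuleiro tamanho_tabuleiro → Pre_verificar_horizontal matriz_tabuleiro tamanho_tabuleiro → Spec_verificar_horizontal matriz_tabuleiro tamanho_tabuleiro (verificar_horizontal matriz_tabuleiro tamanho_tabuleiro)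

-- ===== LEMMAS AND PROOFS =====

-- A's inner loop in propositional form
lemma rowA_iff (r : List Int) (t : Int) :
    ((PySem.List.pyRange 1 t 1).all (fun coluna =>
        PySem.List.pyGetD r coluna 0 == PySem.List.pyGetD r 0 0 - coluna) = true) ↔
    (∀ i : Nat, 1 ≤ i → i < t.toNat → r.getD i 0 = r.getD 0 0 - i) := by
  rw [List.all_eq_true]
  constructor
  · intro h i h1 h2
    have hm : (i : Int) ∈ PySem.List.pyRange 1 t 1 := by
      rw [PySem.List.mem_pyRange_one]; omega
    have := h _ hm
    simp only [PySem.List.pyGetD_natCast, PySem.List.pyGetD_zero, beq_iff_eq] at this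
    exact this
  · intro h c hc
    rw [PySem.List.mem_pyRange_one] at hc
    have h0 : c = ((c.toNat : Nat) : Int) := by omega
    have := h c.toNat (by omega) (by omega)
    rw [h0]
    simp only [PySem.List.pyGetD_natCast, PySem.List.pyGetD_zero, beq_iff_eq]
    exact this

-- B's row test in propositional form (on a long-enough row)
lemma rowB_iff (r : List Int) (t : Int) (ht : 0 < t) (hl : t ≤ r.length) :
    ((let fila := PySem.List.slice r none (some t);
      fila == PySem.List.pyRange (PySem.List.pyGetD fila 0 0)
        (PySem.List.pyGetD fila 0 0 - t) (-1)) = true) ↔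
    (∀ i : Nat, 1 ≤ i → i < t.toNat → r.getD i 0 = r.getD 0 0 - i) := by
  have hslice : PySem.List.slice r none (some t) = r.take t.toNat :=
    PySem.List.slice_to r ht.le
  have hlen : (r.take t.toNat).length = t.toNat := by
    rw [List.length_take]; omega
  have h0 : PySem.List.pyGetD (r.take t.toNat) 0 0 = r.getD 0 0 := by
    have : PySem.List.pyGetD (r.take t.toNat) 0 0 = (r.take t.toNat).getD 0 0 := by
      simp [PySem.List.pyGetD_zero]
    rw [this, List.getD_eq_getElem _ 0 (by omega), List.getD_eq_getElem r 0 (by omega),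
      List.getElem_take]
  have hrange : PySem.List.pyRange (r.getD 0 0) (r.getD 0 0 - t) (-1) =
      (List.range t.toNat).map (fun k : Nat => r.getD 0 0 - (k : Int)) := by
    rw [PySem.List.pyRange_neg_one]
    have he : (r.getD 0 0 - (r.getD 0 0 - t)).toNat = t.toNat := by omega
    rw [he]
  simp only [hslice, h0, hrange, beq_iff_eq]
  rw [List.ext_getElem_iff]
  constructor
  · intro ⟨hle, h⟩ i h1 hi
    have := h i (by omega) (by simp; omega)
    rw [List.getElem_take, List.getElem_map, List.getElem_range] at this
    have hiE : r.getD i 0 = r[i]'(by omega) := List.getD_eq_getElem r 0 (by omega)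
    rw [hiE]
    exact this
  · intro h
    refine ⟨by simp [hlen], ?_⟩
    intro i hi _
    rw [List.getElem_take, List.getElem_map, List.getElem_range]
    rw [hlen] at hi
    have h00 : r.getD 0 0 = r[0]'(by omega) := List.getD_eq_getElem r 0 (by omega)
    rcases Nat.eq_zero_or_pos i with rfl | hp
    · rw [h00]; simp
    · have hv := h i hp hi
      have hiE : r.getD i 0 = r[i]'(by omega) := List.getD_eq_getElem r 0 (by omega)
      rw [hiE] at hv
      exact hv

-- vhAux is List.any of the row test
lemma vhAux_eq_any (t : Int) (rows : List (List Int)) :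
    vhAux t rows = rows.any (fun linha =>
      let fila := PySem.List.slice linha none (some t)
      fila == PySem.List.pyRange (PySem.List.pyGetD fila 0 0)
        (PySem.List.pyGetD fila 0 0 - t) (-1)) := by
  induction rows with
  | nil => rfl
  | cons r rest ih =>
    simp only [vhAux, List.any_cons, ih]
    split_ifs with h
    · simp [h]
    · simp [h]

-- ===== VERDICT (by name: the statement is the Claim_ definition above) =====
theorem verificar_horizontal_spec : Claim_equal_verificar_horizontal := by
  intro m t _ hpre
  unfold Spec_verificar_horizontal verificar_horizontal verificar_horizontal_alt
  by_cases hle : t ≤ 0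
  · rw [PySem.List.pyRange_one_eq_nil hle, if_pos hle]; rfl
  · rcases hpre with h | ⟨hlen, hrows⟩
    · omega
    have ht : 0 < t := by omega
    rw [if_neg hle, vhAux_eq_any, PySem.List.slice_to m ht.le]
    have hrow : ∀ (i : Nat) (hi : i < t.toNat),
        ((PySem.List.pyRange 1 t 1).all (fun coluna =>
          PySem.List.pyGetD (m[i]'(by omega)) coluna 0 ==
            PySem.List.pyGetD (m[i]'(by omega)) 0 0 - coluna)) =
        ((let fila := PySem.List.slice (m[i]'(by omega)) none (some t);
          fila == PySem.List.pyRange (PySem.List.pyGetD fila 0 0)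
            (PySem.List.pyGetD fila 0 0 - t) (-1))) := by
      intro i hi
      have hmem : m[i]'(by omega) ∈ m.take t.toNat := by
        rw [List.mem_take_iff_getElem]
        exact ⟨i, by omega, rfl⟩
      have hl := hrows _ hmem
      rw [Bool.eq_iff_iff, rowA_iff, rowB_iff _ t ht hl]
    rw [Bool.eq_iff_iff]
    simp only [List.any_eq_true]
    constructor
    · rintro ⟨linha, hmem, hcond⟩
      rw [PySem.List.mem_pyRange_one] at hmem
      have hget : PySem.List.pyGetD m linha [] = m[linha.toNat]'(by omega) :=
        PySem.List.pyGetD_eq_getElem m [] (by omega) (by omega)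
      refine ⟨m[linha.toNat]'(by omega), ?_, ?_⟩
      · rw [List.mem_take_iff_getElem]; exact ⟨linha.toNat, by omega, rfl⟩
      · rw [← hrow linha.toNat (by omega)]
        rw [hget] at hcond
        exact hcond
    · rintro ⟨r, hmem, hcond⟩
      rw [List.mem_take_iff_getElem] at hmem
      obtain ⟨i, hi, rfl⟩ := hmem
      have hi' : i < t.toNat := by omega
      have him : i < m.length := by omega
      refine ⟨(i : Int), ?_, ?_⟩
      · rw [PySem.List.mem_pyRange_one]; omega
      · have hget : PySem.List.pyGetD m (i : Int) [] = m[i]'him :=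
          PySem.List.pyGetD_eq_getElem m [] (by omega) (by omega)
        rw [hget, hrow i hi']
        exact hcond
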